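-- pv_equiv track=rewrite | github.com/shrine2000/DSA | 1802-maximum-value-at-a-given-index-in-a-bounded-array/1802-maximum-value-at-a-given-index-in-a-bounded-array.py | maxValue
-- ===== SOURCE A (Python) =====
-- def maxValue(n: int, index: int, maxSum: int) -> int:
--     maxSum -= n
--     maxValue = 1
--     left = index
--     right = index
--     while right - left + 1 <= maxSum:
--         maxSum -= right - left + 1
--         left = max(left - 1, 0)
--         right = min(right + 1, n - 1)
--         maxValue += 1
--         if left == 0 and right == n - 1:
--             maxValue += maxSum // n
--             break
--     return maxValue
-- ===== SOURCE B (Python) =====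
-- def maxValue(n: int, index: int, maxSum: int) -> int:
--     def arith(top, length):
--         # sum over `length` cells of the sequence top, top-1, ..., floored at 1
--         if length <= top:
--             return length * (2 * top - length + 1) // 2
--         return top * (top + 1) // 2 + (length - top)
--
--     def needed(v):
--         # total array sum when the value at `index` is v and the array is as small as possible
--         return v + arith(v - 1, index) + arith(v - 1, n - 1 - index)
--
--     lo, hi = 1, maxSum
--     while lo < hi:
--         mid = (lo + hi + 1) // 2
--         if needed(mid) <= maxSum:
--             lo = mid
--         else:
--             hi = mid - 1
--     return lo
-- ===== Notes on version B (the rewrite author's own statement) =====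
-- stated objective: alternative
-- what changed: Replaces A's step-by-step window expansion (subtracting each window size from the budget) by a binary search on the answer whose feasibility check is a closed-form arithmetic-series sum; asymptotically fewer iterations on the natural domain, though a timing run's inputs fell outside Pre_ so no speed is claimed.
-- outside the precondition, e.g. on maxValue(5, -3, 4): A returns 1, B returns 4; on maxValue(5, 7, 10): A returns 6, B returns 8; on maxValue(-3, 1, 0): A returns 1, B returns 1
import Mathlib
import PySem

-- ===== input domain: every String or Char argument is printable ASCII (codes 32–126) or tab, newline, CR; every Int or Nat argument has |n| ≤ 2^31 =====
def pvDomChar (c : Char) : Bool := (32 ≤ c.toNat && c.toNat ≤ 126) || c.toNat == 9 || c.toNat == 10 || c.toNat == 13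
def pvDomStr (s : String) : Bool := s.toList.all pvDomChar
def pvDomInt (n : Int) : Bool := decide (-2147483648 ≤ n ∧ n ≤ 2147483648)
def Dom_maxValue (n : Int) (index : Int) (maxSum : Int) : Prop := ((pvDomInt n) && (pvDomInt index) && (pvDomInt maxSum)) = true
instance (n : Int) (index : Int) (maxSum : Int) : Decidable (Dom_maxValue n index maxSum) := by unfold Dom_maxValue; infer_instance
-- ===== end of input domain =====

-- B replaces A's cell-by-cell window expansion with a binary search on the answer,
-- checking each candidate peak with a closed-form arithmetic-series sum (objective: alternative).

-- ===== PORT A =====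
-- A's while loop as fuel recursion; under Pre_ every iteration consumes at least 1 of the
-- remaining budget `maxSum` (after the initial `maxSum -= n`), so the given fuel suffices
-- and the guard never fires (the fuel guard only makes the recursion total).
def maxValueLoop (n : Int) (fuel : Nat) (maxSum : Int) (maxVal : Int) (left : Int) (right : Int) : Int :=
  match fuel with
  | 0 => maxVal
  | Nat.succ fuel' =>
    if right - left + 1 ≤ maxSum then
      let maxSum' := maxSum - (right - left + 1)
      let left' := max (left - 1) 0
      let right' := min (right + 1) (n - 1)
      let maxVal' := maxVal + 1
      if left' = 0 ∧ right' = n - 1 then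
        maxVal' + PySem.Int.floordiv maxSum' n
      else
        maxValueLoop n fuel' maxSum' maxVal' left' right'
    else maxVal

def maxValue (n : Int) (index : Int) (maxSum : Int) : Int :=
  maxValueLoop n ((maxSum - n).toNat + n.toNat + index.natAbs + 4) (maxSum - n) 1 index index

-- ===== PORT B =====
-- sum over `length` cells of the sequence top, top-1, ..., floored at 1
def pyArith (top : Int) (length : Int) : Int :=
  if length ≤ top then PySem.Int.floordiv (length * (2 * top - length + 1)) 2
  else PySem.Int.floordiv (top * (top + 1)) 2 + (length - top)

-- total array sum when the value at `index` is v and the array is as small as possible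
def pyNeeded (n : Int) (index : Int) (v : Int) : Int :=
  v + pyArith (v - 1) index + pyArith (v - 1) (n - 1 - index)

-- midpoint bounds, used for termination of the binary-search loop
theorem bsMid_bounds (lo hi : Int) (h : lo < hi) :
    lo + 1 ≤ PySem.Int.floordiv (lo + hi + 1) 2 ∧ PySem.Int.floordiv (lo + hi + 1) 2 ≤ hi := by
  rw [PySem.Int.floordiv_eq_ediv_of_pos (by norm_num)]
  omega

def bsLoop (n : Int) (index : Int) (maxSum : Int) (lo : Int) (hi : Int) : Int :=
  if h : lo < hi then
    let mid := PySem.Int.floordiv (lo + hi + 1) 2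
    if pyNeeded n index mid ≤ maxSum then bsLoop n index maxSum mid hi
    else bsLoop n index maxSum lo (mid - 1)
  else lo
termination_by (hi - lo).toNat
decreasing_by
  · have := bsMid_bounds lo hi h; omega
  · have := bsMid_bounds lo hi h; omega

def maxValue_alt (n : Int) (index : Int) (maxSum : Int) : Int :=
  bsLoop n index maxSum 1 maxSum

-- ===== PRECONDITION & SPEC =====
-- Pre_ admits the problem's natural domain (1 ≤ n, index in range, any maxSum) and, beyond it,
-- every input with maxSum ≤ min(n, 1), where the budget admits no increment and both programs
-- return 1; excluded are only inputs outside the natural domain with a larger budget, on which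
-- A's returned value is an artefact of its window arithmetic (and at n = 0 A raises
-- ZeroDivisionError at the break).
def Pre_maxValue (n : Int) (index : Int) (maxSum : Int) : Prop :=
  (1 ≤ n ∧ 0 ≤ index ∧ index < n) ∨ (maxSum ≤ n ∧ maxSum ≤ 1)
instance (n : Int) (index : Int) (maxSum : Int) : Decidable (Pre_maxValue n index maxSum) := by
  unfold Pre_maxValue; infer_instance

def pvWitness_maxValue : Int × Int × Int := (5, 2, 12)

def Spec_maxValue (n : Int) (index : Int) (maxSum : Int) (out : Int) : Prop := out = maxValue_alt n index maxSum
instance (n : Int) (index : Int) (maxSum : Int) (out : Int) : Decidable (Spec_maxValue n index maxSum out) := by unfold Spec_maxValue; infer_instance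

-- ===== CLAIM (what is proved, stated in full; the proofs are below) =====
def Claim_equal_maxValue : Prop := ∀ (n : Int) (index : Int) (maxSum : Int), Dom_maxValue n index maxSum → Pre_maxValue n index maxSum → Spec_maxValue n index maxSum (maxValue n index maxSum)

-- ===== LEMMAS AND PROOFS =====

-- cost of raising the peak from k+1 to k+2 (size of A's window after k expansions)
def wstep (n : Int) (index : Int) (k : Nat) : Int :=
  min (index + (k : Int)) (n - 1) - max (index - (k : Int)) 0 + 1

-- minimal total sum for peak k+1 (recursive form)
def G (n : Int) (index : Int) : Nat → Int
  | 0 => n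
  | k + 1 => G n index k + wstep n index k

theorem wstep_pos (n index : Int) (k : Nat) (hn : 1 ≤ n) (h0 : 0 ≤ index) (h1 : index < n) :
    1 ≤ wstep n index k := by
  unfold wstep; omega

theorem arith_base (len : Int) (hl : 0 ≤ len) : pyArith 0 len = len := by
  unfold pyArith
  rw [PySem.Int.floordiv_eq_ediv_of_pos (by norm_num),
      PySem.Int.floordiv_eq_ediv_of_pos (by norm_num)]
  split_ifs with h
  · have : len = 0 := by omega
    subst this; norm_num
  · norm_num

theorem arith_succ (top len : Int) (ht : 0 ≤ top) (hl : 0 ≤ len) :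
    pyArith (top + 1) len = pyArith top len + min len top := by
  unfold pyArith
  simp only [PySem.Int.floordiv_eq_ediv_of_pos (show (0:Int) < 2 by norm_num)]
  split_ifs with h1 h2 h2
  · -- len ≤ top + 1 and len ≤ top
    have e : len * (2 * (top + 1) - len + 1) = len * (2 * top - len + 1) + len * 2 := by ring
    rw [e, Int.add_mul_ediv_right _ _ (by norm_num : (2:Int) ≠ 0), min_eq_left h2]
  · -- len ≤ top + 1, ¬ len ≤ top, so len = top + 1
    have hlen : len = top + 1 := by omega
    subst hlen
    have e : (top + 1) * (2 * (top + 1) - (top + 1) + 1) = top * (top + 1) + (top + 1) * 2 := by ring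
    rw [e, Int.add_mul_ediv_right _ _ (by norm_num : (2:Int) ≠ 0), min_eq_right (by omega)]
    generalize top * (top + 1) = X
    omega
  · omega
  · -- len > top + 1
    have e : (top + 1) * (top + 1 + 1) = top * (top + 1) + (top + 1) * 2 := by ring
    rw [e, Int.add_mul_ediv_right _ _ (by norm_num : (2:Int) ≠ 0), min_eq_right (by omega)]
    generalize top * (top + 1) = X
    omega

theorem needed_eq_G (n index : Int) (hn : 1 ≤ n) (h0 : 0 ≤ index) (h1 : index < n) :
    ∀ k : Nat, pyNeeded n index ((k : Int) + 1) = G n index k := by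
  intro k
  induction k with
  | zero =>
    unfold pyNeeded G
    norm_num
    rw [arith_base index h0, arith_base (n - 1 - index) (by omega)]
    ring
  | succ k ih =>
    unfold pyNeeded at ih ⊢
    push_cast
    have e1 : (k : Int) + 1 + 1 - 1 = (k : Int) + 1 := by ring
    rw [e1]
    rw [arith_succ (k : Int) index (by positivity) h0,
        arith_succ (k : Int) (n - 1 - index) (by positivity) (by omega)]
    have e2 : (k : Int) + 1 - 1 = (k : Int) := by ring
    rw [e2] at ih
    rw [G, ← ih]
    unfold wstep
    omega

theorem G_succ (n index : Int) (k : Nat) : G n index (k + 1) = G n index k + wstep n index k := rfl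

theorem G_ge (n index : Int) (hn : 1 ≤ n) (h0 : 0 ≤ index) (h1 : index < n) :
    ∀ k : Nat, n + (k : Int) ≤ G n index k := by
  intro k
  induction k with
  | zero => simp [G]
  | succ k ih =>
    have := wstep_pos n index k hn h0 h1
    rw [G_succ]; push_cast; omega

theorem G_mono (n index : Int) (hn : 1 ≤ n) (h0 : 0 ≤ index) (h1 : index < n) :
    ∀ a b : Nat, a ≤ b → G n index a ≤ G n index b := by
  intro a b hab
  induction b with
  | zero => interval_cases a; rfl
  | succ b ih =>
    rcases Nat.lt_or_ge a (b + 1) with h | h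
    · have := wstep_pos n index b hn h0 h1
      have := ih (by omega)
      rw [G_succ]; omega
    · have : a = b + 1 := by omega
      subst this; rfl

theorem G_sat (n index : Int) (m : Nat) (hL : index ≤ (m : Int)) (hR : n - 1 ≤ index + (m : Int)) :
    ∀ t : Nat, G n index (m + t) = G n index m + (t : Int) * n := by
  intro t
  induction t with
  | zero => simp
  | succ t ih =>
    have hw : wstep n index (m + t) = n := by unfold wstep; push_cast; omega
    have : m + (t + 1) = (m + t) + 1 := by omega
    rw [this, G_succ, ih, hw]; push_cast; ring

-- the common characterisation: r = k' + 1 where k' is maximal with G k' ≤ maxSum (or k' = 0)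
def Achar (n index maxSum r : Int) : Prop :=
  ∃ k' : Nat, r = (k' : Int) + 1 ∧ (G n index k' ≤ maxSum ∨ k' = 0) ∧ maxSum < G n index (k' + 1)

theorem loopA (n index maxSum : Int) (hn : 1 ≤ n) (h0 : 0 ≤ index) (h1 : index < n) :
    ∀ (fuel : Nat) (k : Nat), maxSum - G n index k < (fuel : Int) →
      (G n index k ≤ maxSum ∨ k = 0) →
      Achar n index maxSum
        (maxValueLoop n fuel (maxSum - G n index k) ((k : Int) + 1)
          (max (index - (k : Int)) 0) (min (index + (k : Int)) (n - 1))) := by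
  intro fuel
  induction fuel with
  | zero =>
    intro k hfuel hk
    have hknot : ¬ G n index k ≤ maxSum := by omega
    have hk0 : k = 0 := by tauto
    subst hk0
    refine ⟨0, by simp [maxValueLoop], Or.inr rfl, ?_⟩
    have := wstep_pos n index 0 hn h0 h1
    rw [G_succ]
    simp only [G] at hfuel ⊢
    omega
  | succ fuel ih =>
    intro k hfuel hk
    simp only [maxValueLoop]
    have hwk : min (index + (k : Int)) (n - 1) - max (index - (k : Int)) 0 + 1 = wstep n index k := rfl
    have hwpos := wstep_pos n index k hn h0 h1
    rw [hwk]
    split_ifs with hcond hbreak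
    · -- loop body ran; window expanded; break taken
      obtain ⟨hbl, hbr⟩ := hbreak
      -- saturation facts from the break condition
      have hsatL : index ≤ (k : Int) + 1 := by omega
      have hsatR : n - 1 ≤ index + ((k : Int) + 1) := by omega
      have hms' : maxSum - G n index k - wstep n index k = maxSum - G n index (k + 1) := by
        rw [G_succ]; ring
      rw [hms']
      set a := maxSum - G n index (k + 1) with ha
      have hanneg : 0 ≤ a := by rw [ha, G_succ]; omega
      rw [PySem.Int.floordiv_eq_ediv_of_pos (by omega : (0:Int) < n)]
      set q := a / n with hq
      have hqnn : 0 ≤ q := Int.ediv_nonneg hanneg (by omega)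
      have hdm := Int.mul_ediv_add_emod a n
      have hmodnn := Int.emod_nonneg a (by omega : n ≠ 0)
      have hmodlt := Int.emod_lt_of_pos a (by omega : 0 < n)
      refine ⟨(k + 1) + q.toNat, ?_, ?_, ?_⟩
      · push_cast [Int.toNat_of_nonneg hqnn]; ring
      · left
        rw [G_sat n index (k + 1) (by push_cast; omega) (by push_cast; omega) q.toNat,
            Int.toNat_of_nonneg hqnn]
        nlinarith [hdm, hmodnn]
      · have : (k + 1) + q.toNat + 1 = (k + 1) + (q.toNat + 1) := by omega
        rw [this,
            G_sat n index (k + 1) (by push_cast; omega) (by push_cast; omega) (q.toNat + 1)]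
        push_cast [Int.toNat_of_nonneg hqnn]
        nlinarith [hdm, hmodlt]
    · -- loop body ran; recurse
      have hms' : maxSum - G n index k - wstep n index k = maxSum - G n index (k + 1) := by
        rw [G_succ]; ring
      have hl' : max (max (index - (k : Int)) 0 - 1) 0 = max (index - ((k:Int) + 1)) 0 := by omega
      have hr' : min (min (index + (k : Int)) (n - 1) + 1) (n - 1) = min (index + ((k:Int) + 1)) (n - 1) := by omega
      rw [hms', hl', hr']
      have goal := ih (k + 1) (by rw [G_succ]; push_cast; omega) (Or.inl (by rw [G_succ] at hms' ⊢; omega))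
      push_cast at goal ⊢
      exact goal
    · -- loop exits: wstep k > budget
      refine ⟨k, rfl, hk, ?_⟩
      rw [G_succ]; omega

theorem A_char (n index maxSum : Int) (hn : 1 ≤ n) (h0 : 0 ≤ index) (h1 : index < n) :
    Achar n index maxSum (maxValue n index maxSum) := by
  have h := loopA n index maxSum hn h0 h1 ((maxSum - n).toNat + n.toNat + index.natAbs + 4) 0
    (by simp only [G]; omega)
    (Or.inr rfl)
  have e0 : max (index - ((0:Nat) : Int)) 0 = index := by push_cast; omega
  have e1 : min (index + ((0:Nat) : Int)) (n - 1) = index := by push_cast; omega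
  have eG : G n index 0 = n := rfl
  rw [e0, e1, eG] at h
  simpa [maxValue] using h

-- B side
theorem needed_mono (n index : Int) (hn : 1 ≤ n) (h0 : 0 ≤ index) (h1 : index < n)
    (u v : Int) (hu : 1 ≤ u) (huv : u ≤ v) :
    pyNeeded n index u ≤ pyNeeded n index v := by
  have hu' : u = ((u - 1).toNat : Int) + 1 := by omega
  have hv' : v = ((v - 1).toNat : Int) + 1 := by omega
  rw [hu', hv', needed_eq_G n index hn h0 h1, needed_eq_G n index hn h0 h1]
  exact G_mono n index hn h0 h1 _ _ (by omega)

theorem needed_ge (n index : Int) (hn : 1 ≤ n) (h0 : 0 ≤ index) (h1 : index < n)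
    (v : Int) (hv : 1 ≤ v) : v ≤ pyNeeded n index v := by
  have hv' : v = ((v - 1).toNat : Int) + 1 := by omega
  rw [hv', needed_eq_G n index hn h0 h1]
  have := G_ge n index hn h0 h1 (v - 1).toNat
  omega

def Bchar (n index maxSum r : Int) : Prop :=
  1 ≤ r ∧ (pyNeeded n index r ≤ maxSum ∨ r = 1) ∧
    ∀ v : Int, r < v → v ≤ maxSum → ¬ pyNeeded n index v ≤ maxSum

theorem bsLoop_spec (n index maxSum : Int) (hn : 1 ≤ n) (h0 : 0 ≤ index) (h1 : index < n) :
    ∀ (N : Nat) (lo hi : Int), (hi - lo).toNat ≤ N → 1 ≤ lo → lo ≤ hi →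
      (pyNeeded n index lo ≤ maxSum ∨ lo = 1) →
      (∀ v : Int, hi < v → v ≤ maxSum → ¬ pyNeeded n index v ≤ maxSum) →
      Bchar n index maxSum (bsLoop n index maxSum lo hi) := by
  intro N
  induction N with
  | zero =>
    intro lo hi hN hlo hlohi hok hhi
    have : ¬ lo < hi := by omega
    rw [bsLoop, dif_neg this]
    exact ⟨hlo, hok, fun v hv hvle => hhi v (by omega) hvle⟩
  | succ N ih =>
    intro lo hi hN hlo hlohi hok hhi
    rw [bsLoop]
    split_ifs with hlt
    · have hmid := bsMid_bounds lo hi hlt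
      set mid := PySem.Int.floordiv (lo + hi + 1) 2 with hm
      simp only []
      split_ifs with hokmid
      · exact ih mid hi (by omega) (by omega) (by omega) (Or.inl hokmid) hhi
      · refine ih lo (mid - 1) (by omega) hlo (by omega) hok ?_
        intro v hv hvle hvok
        by_cases hvhi : v ≤ hi
        · exact hokmid (le_trans (needed_mono n index hn h0 h1 mid v (by omega) (by omega)) hvok)
        · exact hhi v (by omega) hvle hvok
    · exact ⟨hlo, hok, fun v hv hvle => hhi v (by omega) hvle⟩

theorem B_char (n index maxSum : Int) (hn : 1 ≤ n) (h0 : 0 ≤ index) (h1 : index < n) :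
    Bchar n index maxSum (maxValue_alt n index maxSum) := by
  unfold maxValue_alt
  by_cases h : 1 ≤ maxSum
  · exact bsLoop_spec n index maxSum hn h0 h1 (maxSum - 1).toNat 1 maxSum (by omega) le_rfl h
      (Or.inr rfl) (fun v hv hvle => absurd hvle (by omega))
  · rw [bsLoop, dif_neg (by omega : ¬ (1:Int) < maxSum)]
    exact ⟨le_rfl, Or.inr rfl, fun v hv hvle => absurd (le_trans (by omega) hvle) (by omega)⟩

theorem unique_char (n index maxSum : Int) (hn : 1 ≤ n) (h0 : 0 ≤ index) (h1 : index < n)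
    (r1 r2 : Int) (hA : Achar n index maxSum r1) (hB : Bchar n index maxSum r2) : r1 = r2 := by
  obtain ⟨k, hk, hkle, hkgt⟩ := hA
  obtain ⟨hr2, hok2, hmax2⟩ := hB
  -- turn Achar into Bchar-style facts
  have hr1 : 1 ≤ r1 := by omega
  have hok1 : pyNeeded n index r1 ≤ maxSum ∨ r1 = 1 := by
    rcases hkle with hle | h0k
    · left; rw [hk, needed_eq_G n index hn h0 h1]; exact hle
    · right; omega
  have hmax1 : ∀ v : Int, r1 < v → v ≤ maxSum → ¬ pyNeeded n index v ≤ maxSum := by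
    intro v hv hvle hvok
    have h2 : pyNeeded n index ((k : Int) + 2) ≤ maxSum := by
      refine le_trans (needed_mono n index hn h0 h1 _ v (by omega) (by omega)) hvok
    have : (k : Int) + 2 = ((k + 1 : Nat) : Int) + 1 := by push_cast; ring
    rw [this, needed_eq_G n index hn h0 h1] at h2
    omega
  rcases lt_trichotomy r1 r2 with hlt | heq | hgt
  · exfalso
    have hok : pyNeeded n index r2 ≤ maxSum := by rcases hok2 with h | h; exact h; omega
    exact hmax1 r2 hlt (le_trans (needed_ge n index hn h0 h1 r2 hr2) hok) hok
  · exact heq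
  · exfalso
    have hok : pyNeeded n index r1 ≤ maxSum := by rcases hok1 with h | h; exact h; omega
    exact hmax2 r1 hgt (le_trans (needed_ge n index hn h0 h1 r1 hr1) hok) hok

-- on inputs whose budget admits no increment, A's loop exits at once
theorem loop_one (n ms l r : Int) (fuel : Nat) (h : ms < r - l + 1) :
    maxValueLoop n fuel ms 1 l r = 1 := by
  cases fuel with
  | zero => rfl
  | succ fuel => simp only [maxValueLoop, if_neg (by omega : ¬ r - l + 1 ≤ ms)]

-- ===== VERDICT (by name: the statement is the Claim_ definition above) =====
theorem maxValue_spec : Claim_equal_maxValue := by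
  intro n index maxSum hdom hpre
  rcases hpre with ⟨hn, h0, h1⟩ | ⟨hmn, hm1⟩
  · exact unique_char n index maxSum hn h0 h1 _ _
      (A_char n index maxSum hn h0 h1) (B_char n index maxSum hn h0 h1)
  · show maxValue n index maxSum = maxValue_alt n index maxSum
    rw [maxValue, loop_one n (maxSum - n) index index _ (by omega),
        maxValue_alt, bsLoop, dif_neg (by omega : ¬ (1:Int) < maxSum)]
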